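-- pv_equiv track=rewrite | github.com/SoltidueMarquez/StableMotion | data_loaders/CheckCorruptUtil.py | _find_corrupt_intervals
-- ===== SOURCE A (Python) =====
-- from typing import Iterable, List, Tuple
--
-- def _find_corrupt_intervals(
--     mask: Iterable[bool],
--     min_length: int,
-- ) -> List[Tuple[int, int]]:
--     """
--     将布尔掩码转换为闭区间列表，结果为 [1, len] 1-based 帧索引。
--     只返回长度大于指定 min_length 的连续段落。
--     """
--     intervals: List[Tuple[int, int]] = []
--     start: int | None = None
--     length = 0
--     for index, flag in enumerate(mask):
--         if flag:
--             length += 1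
--             if start is None:
--                 start = index
--         elif start is not None:
--             if length >= min_length:
--                 intervals.append((start + 1, index))
--             start = None
--             length = 0
--
--     if start is not None and length >= min_length:
--         intervals.append((start + 1, len(mask)))
--     return intervals
-- ===== SOURCE B (Python) =====
-- from typing import Iterable, List, Tuple
--
-- def _find_corrupt_intervals(
--     mask: Iterable[bool],
--     min_length: int,
-- ) -> List[Tuple[int, int]]:
--     # Boundary detection: a run starts where the flag is True and its left
--     # neighbour is False, and ends where the flag is True and its right
--     # neighbour is False; pair them up and keep the long-enough runs.
--     m = list(mask)
--     starts = [i for i, (b, p) in enumerate(zip(m, [False] + m)) if b and not p]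
--     ends = [i + 1 for i, (b, q) in enumerate(zip(m, m[1:] + [False])) if b and not q]
--     return [(s + 1, e) for s, e in zip(starts, ends) if e - s >= min_length]
-- ===== Notes on version B (the rewrite author's own statement) =====
-- stated objective: alternative
-- what changed: Replaces A's single-pass running start/length state machine (with a separate end-of-loop flush) by staged boundary detection: compare the mask with its shifted copies to collect the list of run starts and the list of run ends, zip them into runs, then filter by length.
import Mathlib
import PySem

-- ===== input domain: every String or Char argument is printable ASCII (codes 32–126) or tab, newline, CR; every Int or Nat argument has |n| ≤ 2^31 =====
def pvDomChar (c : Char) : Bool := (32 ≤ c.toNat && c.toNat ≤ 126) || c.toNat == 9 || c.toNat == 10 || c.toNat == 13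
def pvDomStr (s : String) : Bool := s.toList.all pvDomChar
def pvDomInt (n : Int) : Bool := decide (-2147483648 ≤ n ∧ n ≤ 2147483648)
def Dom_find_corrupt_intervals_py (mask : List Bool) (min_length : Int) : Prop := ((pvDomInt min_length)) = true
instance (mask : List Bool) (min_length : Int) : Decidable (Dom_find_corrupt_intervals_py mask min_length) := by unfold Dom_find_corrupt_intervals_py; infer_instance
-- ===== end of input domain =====

-- B replaces A's running start/length state machine (and its end-of-loop flush) by staged
-- boundary detection: zip the mask with its shifted copies to list run starts and run ends,
-- zip those together and filter by length. Same O(n) cost, different decomposition.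

-- ===== PORT A =====
-- the for-loop over enumerate(mask): state = (intervals acc, start, length); [] case = the final flush
def pvAGo (ml n i : Int) (l : List Bool) (acc : List (Int × Int)) (start : Option Int) (len : Int) : List (Int × Int) :=
  match l with
  | [] =>
    match start with
    | some s => if len ≥ ml then acc ++ [(s + 1, n)] else acc
    | none => acc
  | f :: rest =>
    if f then
      pvAGo ml n (i + 1) rest acc (match start with | none => some i | some s => some s) (len + 1)
    else
      match start with
      | some s =>
        if len ≥ ml then pvAGo ml n (i + 1) rest (acc ++ [(s + 1, i)]) none 0
        else pvAGo ml n (i + 1) rest acc none 0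
      | none => pvAGo ml n (i + 1) rest acc none 0

def find_corrupt_intervals_py (mask : List Bool) (min_length : Int) : List (Int × Int) :=
  pvAGo min_length (mask.length : Int) 0 mask [] none 0

-- ===== PORT B =====
-- [i for i, (b, p) in enumerate(zip(m, [False] + m)) if b and not p]
def pvStarts (m : List Bool) : List Int :=
  (PySem.List.enumerate (m.zip (false :: m)) 0).filterMap
    (fun p => if p.2.1 && !p.2.2 then some p.1 else none)

-- [i + 1 for i, (b, q) in enumerate(zip(m, m[1:] + [False])) if b and not q]
def pvEnds (m : List Bool) : List Int :=
  (PySem.List.enumerate (m.zip (PySem.List.slice m (some 1) none ++ [false])) 0).filterMap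
    (fun p => if p.2.1 && !p.2.2 then some (p.1 + 1) else none)

def find_corrupt_intervals_py_alt (mask : List Bool) (min_length : Int) : List (Int × Int) :=
  ((pvStarts mask).zip (pvEnds mask)).filterMap
    (fun p => if p.2 - p.1 ≥ min_length then some (p.1 + 1, p.2) else none)

-- ===== PRECONDITION & SPEC =====
def Spec_find_corrupt_intervals_py (mask : List Bool) (min_length : Int) (out : List (Int × Int)) : Prop := out = find_corrupt_intervals_py_alt mask min_length
instance (mask : List Bool) (min_length : Int) (out : List (Int × Int)) : Decidable (Spec_find_corrupt_intervals_py mask min_length out) := by unfold Spec_find_corrupt_intervals_py; infer_instance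

-- ===== CLAIM (what is proved, stated in full; the proofs are below) =====
def Claim_equal_find_corrupt_intervals_py : Prop := ∀ (mask : List Bool) (min_length : Int), Dom_find_corrupt_intervals_py mask min_length → Spec_find_corrupt_intervals_py mask min_length (find_corrupt_intervals_py mask min_length)

-- ===== LEMMAS AND PROOFS =====
def pvTk (l : List Bool) : Nat := (l.takeWhile (· = true)).length

-- the maximal True runs of the mask, as (start, end-exclusive) absolute indices from i
def pvRuns : Int → List Bool → List (Int × Int)
  | _, [] => []
  | i, false :: r => pvRuns (i + 1) r
  | i, true :: r =>
      (i, i + 1 + (pvTk r : Int)) :: pvRuns (i + 1 + (pvTk r : Int)) (r.dropWhile (· = true))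
termination_by _ l => l.length
decreasing_by
  · simp
  · exact Nat.lt_succ_of_le (List.length_dropWhile_le _ _)

lemma pvRuns_nil (i : Int) : pvRuns i [] = [] := by rw [pvRuns]

lemma pvRuns_false (i : Int) (r : List Bool) : pvRuns i (false :: r) = pvRuns (i + 1) r := by
  rw [pvRuns]

lemma pvRuns_true (i : Int) (r : List Bool) :
    pvRuns i (true :: r) =
      (i, i + 1 + (pvTk r : Int)) :: pvRuns (i + 1 + (pvTk r : Int)) (r.dropWhile (· = true)) := by
  rw [pvRuns]

lemma pvTk_true (r : List Bool) : pvTk (true :: r) = pvTk r + 1 := by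
  simp [pvTk, List.takeWhile]

lemma pvTk_false (r : List Bool) : pvTk (false :: r) = 0 := rfl

lemma pvDrop_true (r : List Bool) :
    (true :: r).dropWhile (· = true) = r.dropWhile (· = true) := rfl

lemma pvDrop_false (r : List Bool) :
    (false :: r).dropWhile (· = true) = false :: r := rfl

lemma pvLen_split (l : List Bool) :
    l.length = pvTk l + (l.dropWhile (· = true)).length := by
  rw [pvTk, ← List.length_append, List.takeWhile_append_dropWhile]

lemma pvDropHead (l : List Bool) :
    l.dropWhile (· = true) = [] ∨ ∃ r, l.dropWhile (· = true) = false :: r := by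
  induction l with
  | nil => exact Or.inl rfl
  | cons b r ih =>
      cases b with
      | true => rw [pvDrop_true]; exact ih
      | false => exact Or.inr ⟨r, pvDrop_false r⟩

-- ---- A-side: pvAGo computes the filter of pvRuns ----
lemma pvAGo_run (ml : Int) (l : List Bool) : ∀ (n i s len : Int) (acc : List (Int × Int)),
    n = i + l.length →
    pvAGo ml n i l acc (some s) len =
      (match l.dropWhile (· = true) with
       | [] => if len + (pvTk l : Int) ≥ ml then acc ++ [(s + 1, i + (pvTk l : Int))] else acc
       | _ :: rest' =>
           pvAGo ml n (i + (pvTk l : Int) + 1) rest'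
             (if len + (pvTk l : Int) ≥ ml then acc ++ [(s + 1, i + (pvTk l : Int))] else acc)
             none 0) := by
  induction l with
  | nil =>
      intro n i s len acc hn
      have hn2 : n = i := by simpa using hn
      show (if len ≥ ml then acc ++ [(s + 1, n)] else acc) = _
      rw [hn2]
      simp [pvTk, List.takeWhile]
  | cons b rest ih =>
      intro n i s len acc hn
      cases b with
      | true =>
          have hn' : n = (i + 1) + rest.length := by
            simp only [List.length_cons] at hn; push_cast at hn ⊢; omega
          have h := ih n (i + 1) s (len + 1) acc hn'
          show pvAGo ml n (i + 1) rest acc (some s) (len + 1) = _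
          rw [h, pvDrop_true, pvTk_true,
            show ((pvTk rest + 1 : Nat) : Int) = (pvTk rest : Int) + 1 by push_cast; ring,
            show len + ((pvTk rest : Int) + 1) = len + 1 + (pvTk rest : Int) by ring,
            show i + ((pvTk rest : Int) + 1) = i + 1 + (pvTk rest : Int) by ring]
      | false =>
          show (if len ≥ ml then pvAGo ml n (i + 1) rest (acc ++ [(s + 1, i)]) none 0
                else pvAGo ml n (i + 1) rest acc none 0) = _
          rw [pvDrop_false, pvTk_false]
          rw [show ((0 : Nat) : Int) = 0 from rfl, add_zero, add_zero]
          split <;> rfl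

def pvFilt (ml : Int) (rs : List (Int × Int)) : List (Int × Int) :=
  rs.filterMap (fun p => if p.2 - p.1 ≥ ml then some (p.1 + 1, p.2) else none)

lemma pvMainAux (ml : Int) : ∀ (fuel : Nat) (l : List Bool), l.length ≤ fuel →
    ∀ (n i : Int) (acc : List (Int × Int)),
    n = i + l.length →
    pvAGo ml n i l acc none 0 = acc ++ pvFilt ml (pvRuns i l) := by
  intro fuel
  induction fuel with
  | zero =>
      intro l hl n i acc hn
      have : l = [] := List.eq_nil_of_length_eq_zero (Nat.le_zero.mp hl)
      subst this
      simp [pvAGo, pvRuns, pvFilt]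
  | succ fuel ih =>
      intro l hl n i acc hn
      match l with
      | [] => simp [pvAGo, pvRuns, pvFilt]
      | false :: rest =>
          have h := ih rest (by simp only [List.length_cons] at hl; omega) n (i + 1) acc
            (by simp only [List.length_cons] at hn; push_cast at hn ⊢; omega)
          show pvAGo ml n (i + 1) rest acc none 0 = _
          rw [h, pvRuns]
      | true :: rest =>
          have hn' : n = (i + 1) + rest.length := by
            simp only [List.length_cons] at hn; push_cast at hn ⊢; omega
          have hlen := pvLen_split rest
          show pvAGo ml n (i + 1) rest acc (some i) 1 = _
          rw [pvAGo_run ml rest n (i + 1) i 1 acc hn']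
          rw [pvRuns]
          have hfilt : pvFilt ml ((i, i + 1 + (pvTk rest : Int)) ::
              pvRuns (i + 1 + (pvTk rest : Int)) (rest.dropWhile (· = true))) =
              (if 1 + (pvTk rest : Int) ≥ ml then [(i + 1, i + 1 + (pvTk rest : Int))] else []) ++
              pvFilt ml (pvRuns (i + 1 + (pvTk rest : Int)) (rest.dropWhile (· = true))) := by
            simp only [pvFilt, List.filterMap_cons]
            rw [show i + 1 + (pvTk rest : Int) - i = 1 + (pvTk rest : Int) by ring]
            by_cases hc : (1 : Int) + (pvTk rest : Int) ≥ ml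
            · rw [if_pos hc, if_pos hc]; rfl
            · rw [if_neg hc, if_neg hc]; rfl
          rw [hfilt]
          rcases pvDropHead rest with hd | ⟨r', hd⟩
          · rw [hd]
            have htk : pvTk rest = rest.length := by rw [hlen, hd]; simp
            rw [pvRuns_nil]
            have hnn : i + 1 + (pvTk rest : Int) = n := by rw [hn', htk]
            rw [hnn]
            simp only [pvFilt, List.filterMap_nil, List.append_nil]
            by_cases hc : (1 : Int) + (pvTk rest : Int) ≥ ml
            · rw [if_pos hc, if_pos hc]
            · rw [if_neg hc, if_neg hc]; simp
          · rw [hd]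
            dsimp only
            have hlr : rest.length = pvTk rest + (r'.length + 1) := by
              rw [hlen, hd]; simp
            have hfuel : r'.length ≤ fuel := by
              simp only [List.length_cons] at hl; omega
            have hr : n = (i + 1 + (pvTk rest : Int) + 1) + r'.length := by
              rw [hn', hlr]; push_cast; ring
            rw [pvRuns_false]
            rw [ih r' hfuel n (i + 1 + (pvTk rest : Int) + 1) _ hr]
            by_cases hc : (1 : Int) + (pvTk rest : Int) ≥ ml
            · rw [if_pos hc, if_pos hc]; simp
            · rw [if_neg hc, if_neg hc]; simp

-- ---- B-side: the two boundary scans compute the starts / ends of pvRuns ----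
def pvSF : Int × Bool × Bool → Option Int := fun p => if p.2.1 && !p.2.2 then some p.1 else none
def pvEF : Int × Bool × Bool → Option Int := fun p => if p.2.1 && !p.2.2 then some (p.1 + 1) else none

lemma pvStarts_runs (m : List Bool) : ∀ i : Int,
    ((PySem.List.enumerate (m.zip (false :: m)) i).filterMap pvSF = (pvRuns i m).map Prod.fst) ∧
    ((PySem.List.enumerate (m.zip (true :: m)) i).filterMap pvSF =
      (pvRuns (i + (pvTk m : Int)) (m.dropWhile (· = true))).map Prod.fst) := by
  induction m with
  | nil =>
      intro i
      constructor <;> simp [pvRuns_nil, pvSF, pvTk]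
  | cons b r ih =>
      intro i
      cases b with
      | false =>
          have h := (ih (i + 1)).1
          constructor
          · show ((i, false, false) :: PySem.List.enumerate (r.zip (false :: r)) (i + 1)).filterMap pvSF = _
            rw [List.filterMap_cons, show pvSF (i, false, false) = none from rfl, h, pvRuns_false]
          · show ((i, false, true) :: PySem.List.enumerate (r.zip (false :: r)) (i + 1)).filterMap pvSF = _
            rw [List.filterMap_cons, show pvSF (i, false, true) = none from rfl, h,
              pvDrop_false, pvTk_false, pvRuns_false]
            rw [show i + ((0 : Nat) : Int) + 1 = i + 1 by push_cast; ring]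
      | true =>
          have h := (ih (i + 1)).2
          constructor
          · show ((i, true, false) :: PySem.List.enumerate (r.zip (true :: r)) (i + 1)).filterMap pvSF = _
            rw [List.filterMap_cons, show pvSF (i, true, false) = some i from rfl, h, pvRuns_true,
              List.map_cons]
          · show ((i, true, true) :: PySem.List.enumerate (r.zip (true :: r)) (i + 1)).filterMap pvSF = _
            rw [List.filterMap_cons, show pvSF (i, true, true) = none from rfl, h,
              pvDrop_true, pvTk_true]
            rw [show i + ((pvTk r + 1 : Nat) : Int) = i + 1 + (pvTk r : Int) by push_cast; ring]

lemma pvEnds_runs (m : List Bool) : ∀ i : Int,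
    (PySem.List.enumerate (m.zip (m.drop 1 ++ [false])) i).filterMap pvEF =
      (pvRuns i m).map Prod.snd := by
  induction m with
  | nil => intro i; simp [pvRuns_nil, pvEF]
  | cons b r ih =>
      intro i
      have hz : (b :: r).zip ((b :: r).drop 1 ++ [false]) =
          (b, r.headD false) :: r.zip (r.drop 1 ++ [false]) := by
        cases r with
        | nil => rfl
        | cons c r' => rfl
      rw [hz]
      show ((i, b, r.headD false) :: PySem.List.enumerate (r.zip (r.drop 1 ++ [false])) (i + 1)).filterMap pvEF = _
      cases b with
      | false =>
          rw [List.filterMap_cons_none (show pvEF (i, false, r.headD false) = none from rfl),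
            ih (i + 1), pvRuns_false]
      | true =>
          cases r with
          | nil =>
              rw [List.filterMap_cons_some
                (show pvEF (i, true, ([] : List Bool).headD false) = some (i + 1) from rfl)]
              simp [pvRuns_nil, pvRuns_true, pvTk, pvEF]
          | cons c r' =>
              cases c with
              | false =>
                  rw [List.filterMap_cons_some
                    (show pvEF (i, true, (false :: r').headD false) = some (i + 1) from rfl),
                    ih (i + 1), pvRuns_true, pvTk_false, pvDrop_false, pvRuns_false, List.map_cons]
                  simp
                  rw [pvRuns_false]
              | true =>
                  rw [List.filterMap_cons_none
                    (show pvEF (i, true, (true :: r').headD false) = none from rfl),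
                    ih (i + 1), pvRuns_true, pvRuns_true, pvTk_true, pvDrop_true,
                    List.map_cons, List.map_cons,
                    show i + 1 + ((pvTk r' + 1 : Nat) : Int) = i + 1 + 1 + (pvTk r' : Int) by
                      push_cast; ring]

lemma pvAlt_filt (mask : List Bool) (ml : Int) :
    find_corrupt_intervals_py_alt mask ml = pvFilt ml (pvRuns 0 mask) := by
  unfold find_corrupt_intervals_py_alt pvStarts pvEnds
  rw [PySem.List.slice_from_one, show mask.tail = mask.drop 1 by simp]
  rw [show (fun p : Int × Bool × Bool => if p.2.1 && !p.2.2 then some p.1 else none) = pvSF from rfl,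
    show (fun p : Int × Bool × Bool => if p.2.1 && !p.2.2 then some (p.1 + 1) else none) = pvEF from rfl]
  rw [(pvStarts_runs mask 0).1, pvEnds_runs mask 0, List.zip_map']
  simp only [pvFilt]
  rw [List.filterMap_map]
  rfl

-- ===== VERDICT (by name: the statement is the Claim_ definition above) =====
theorem find_corrupt_intervals_py_spec : Claim_equal_find_corrupt_intervals_py := by
  intro mask ml _
  unfold Spec_find_corrupt_intervals_py find_corrupt_intervals_py
  rw [pvAlt_filt]
  exact pvMainAux ml mask.length mask le_rfl (mask.length : Int) 0 [] (by simp)
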